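-- pv_equiv track=rewrite | github.com/manpreetkaur292006-design/DATA-STRUCTURES-ILLUSTRATIONS | Capstone/SocialNetworkExplorer.py | recommend_by_interests
-- ===== SOURCE A (Python) =====
-- def recommend_by_interests(profiles, target_user):
--     target_interests = profiles[target_user]["interests"]
--
--     recommendations = []
--     for user_id, profile in profiles.items():
--         if user_id == target_user:
--             continue
--         common = len(set(target_interests) & set(profile["interests"]))
--         recommendations.append((user_id, common))
--
--     return sorted(recommendations, key=lambda x: x[1], reverse=True)
-- ===== SOURCE B (Python) =====
-- def recommend_by_interests(profiles, target_user):
--     target_interests = profiles[target_user]["interests"]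
--
--     # Inverted index: interest -> list of user_ids (profiles order) having it.
--     index = {}
--     for user_id, profile in profiles.items():
--         if user_id == target_user:
--             continue
--         for interest in set(profile["interests"]):
--             index.setdefault(interest, []).append(user_id)
--
--     # Shared-interest counts via the index.
--     counts = {}
--     for interest in set(target_interests):
--         for user_id in index.get(interest, []):
--             counts[user_id] = counts.get(user_id, 0) + 1
--
--     recommendations = [(user_id, counts.get(user_id, 0))
--                        for user_id in profiles if user_id != target_user]
--     return sorted(recommendations, key=lambda x: x[1], reverse=True)
-- ===== Notes on version B (the rewrite author's own statement) =====
-- stated objective: alternative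
-- what changed: Replaces A's per-user set-intersection loop by an inverted index (interest -> user ids) plus a counts dict filled from the target's distinct interests; the result list is then emitted in profiles order with counts.get and sorted the same way.
import Mathlib
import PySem

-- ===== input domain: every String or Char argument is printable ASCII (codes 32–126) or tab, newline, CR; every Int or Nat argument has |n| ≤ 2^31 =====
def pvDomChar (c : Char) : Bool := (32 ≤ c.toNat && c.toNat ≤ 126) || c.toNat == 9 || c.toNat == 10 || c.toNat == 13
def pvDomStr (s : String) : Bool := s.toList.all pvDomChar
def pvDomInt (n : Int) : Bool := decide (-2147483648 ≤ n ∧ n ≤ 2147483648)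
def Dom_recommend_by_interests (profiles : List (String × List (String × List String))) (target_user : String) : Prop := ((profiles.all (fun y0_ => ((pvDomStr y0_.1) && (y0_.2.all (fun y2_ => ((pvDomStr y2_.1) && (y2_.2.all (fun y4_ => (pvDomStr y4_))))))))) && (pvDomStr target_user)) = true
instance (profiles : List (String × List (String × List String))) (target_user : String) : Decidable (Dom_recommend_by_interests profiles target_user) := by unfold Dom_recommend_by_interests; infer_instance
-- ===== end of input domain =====

-- B replaces A's per-user set intersection by an inverted index (interest -> users) and a
-- counts dict filled from the target's distinct interests; same asymptotic cost (alternative).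

-- shared lookup helper: profile["interests"] (first match, as a Python dict)
def pvInterests (profile : List (String × List String)) : List String :=
  (PySem.Dict.mk profile).getD "interests" []

-- ===== PORT A =====
def recommend_by_interests (profiles : List (String × List (String × List String))) (target_user : String) : List (String × Int) :=
  -- profiles[target_user]["interests"]  (total via getD; Pre_ guarantees both keys are present)
  let target_interests := pvInterests ((PySem.Dict.mk profiles).getD target_user [])
  let recommendations : List (String × Int) :=
    profiles.foldl (fun acc e =>
      if e.1 == target_user then acc
      else acc ++ [(e.1, PySem.Set.len (PySem.Set.inter (PySem.Set.ofList target_interests)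
                                                        (PySem.Set.ofList (pvInterests e.2))))]) []
  PySem.List.sorted recommendations (fun x => x.2) true

-- ===== PORT B =====
def recommend_by_interests_alt (profiles : List (String × List (String × List String))) (target_user : String) : List (String × Int) :=
  let target_interests := pvInterests ((PySem.Dict.mk profiles).getD target_user [])
  -- index.setdefault(interest, []).append(user_id)  =  store back the defaulted list with user_id appended
  let index : PySem.Dict String (List String) :=
    profiles.foldl (fun d e =>
      if e.1 == target_user then d
      else (PySem.Set.ofList (pvInterests e.2)).foldl
             (fun d i => d.insert i (d.getD i [] ++ [e.1])) d) PySem.Dict.empty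
  let counts : PySem.Dict String Int :=
    (PySem.Set.ofList target_interests).foldl
      (fun c i => (index.getD i []).foldl (fun c u => c.insert u (c.getD u 0 + 1)) c) PySem.Dict.empty
  let recommendations : List (String × Int) :=
    profiles.foldl (fun acc e =>
      if e.1 == target_user then acc else acc ++ [(e.1, counts.getD e.1 0)]) []
  PySem.List.sorted recommendations (fun x => x.2) true

-- ===== PRECONDITION & SPEC =====
-- Pre_ excludes exactly the inputs where Python A raises KeyError (target_user not a key, or some
-- profile lacking an "interests" key), and association lists with duplicate keys, which do not
-- denote Python dicts (a dict collapses them, so they add nothing to A's domain).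
def Pre_recommend_by_interests (profiles : List (String × List (String × List String))) (target_user : String) : Prop :=
  target_user ∈ profiles.map Prod.fst ∧
  (profiles.map Prod.fst).Nodup ∧
  ∀ e ∈ profiles, (e.2.map Prod.fst).Nodup ∧ "interests" ∈ e.2.map Prod.fst
instance (profiles : List (String × List (String × List String))) (target_user : String) : Decidable (Pre_recommend_by_interests profiles target_user) := by unfold Pre_recommend_by_interests; infer_instance

def pvWitness_recommend_by_interests : (List (String × List (String × List String))) × String :=
  ([("alice", [("interests", ["music", "art"])]), ("bob", [("interests", ["art", "chess"])])], "alice")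

def Spec_recommend_by_interests (profiles : List (String × List (String × List String))) (target_user : String) (out : List (String × Int)) : Prop := out = recommend_by_interests_alt profiles target_user
instance (profiles : List (String × List (String × List String))) (target_user : String) (out : List (String × Int)) : Decidable (Spec_recommend_by_interests profiles target_user out) := by unfold Spec_recommend_by_interests; infer_instance

-- ===== CLAIM (what is proved, stated in full; the proofs are below) =====
def Claim_equal_recommend_by_interests : Prop := ∀ (profiles : List (String × List (String × List String))) (target_user : String), Dom_recommend_by_interests profiles target_user → Pre_recommend_by_interests profiles target_user → Spec_recommend_by_interests profiles target_user (recommend_by_interests profiles target_user)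

-- ===== LEMMAS AND PROOFS =====

-- the index's inner loop over one user's (distinct) interests, read back at j
theorem pvIdxInner (l : List String) (hl : l.Nodup) (uid j : String)
    (d : PySem.Dict String (List String)) :
    (l.foldl (fun d i => d.insert i (d.getD i [] ++ [uid])) d).getD j [] =
      d.getD j [] ++ (if j ∈ l then [uid] else []) := by
  induction l generalizing d with
  | nil => simp
  | cons i l ih =>
    have hni : i ∉ l := (List.nodup_cons.mp hl).1
    simp only [List.foldl_cons]
    rw [ih (List.nodup_cons.mp hl).2, PySem.Dict.getD_insert]
    by_cases hj : j = i
    · subst hj; simp [hni]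
    · simp [hj, List.mem_cons]

-- the whole index loop: index[j] is the list of non-target user ids whose interests contain j
theorem pvIdxOuter (P : List (String × List (String × List String))) (tgt j : String)
    (d : PySem.Dict String (List String)) :
    (P.foldl (fun d e =>
        if e.1 == tgt then d
        else (PySem.Set.ofList (pvInterests e.2)).foldl
               (fun d i => d.insert i (d.getD i [] ++ [e.1])) d) d).getD j [] =
      d.getD j [] ++
        (P.filter (fun e => e.1 != tgt && decide (j ∈ pvInterests e.2))).map Prod.fst := by
  induction P generalizing d with
  | nil => simp
  | cons e P ih =>
    simp only [List.foldl_cons]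
    by_cases he : e.1 = tgt
    · have hbeq : (e.1 == tgt) = true := by simp [he]
      rw [hbeq]
      simp only [if_true]
      rw [ih]
      have hcond : (e.1 != tgt && decide (j ∈ pvInterests e.2)) = false := by simp [he]
      simp [hcond]
    · have hbeq : (e.1 == tgt) = false := by simp [he]
      rw [hbeq]
      simp only [if_false, Bool.false_eq_true]
      rw [ih, pvIdxInner _ (PySem.Set.nodup_ofList _)]
      by_cases hj : j ∈ pvInterests e.2
      · have hs : j ∈ PySem.Set.ofList (pvInterests e.2) := (PySem.Set.mem_ofList _ _).mpr hj
        simp [he, hj, hs]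
      · have hs : j ∉ PySem.Set.ofList (pvInterests e.2) := fun h => hj ((PySem.Set.mem_ofList _ _).mp h)
        simp [hj, hs]

-- the counts loop: counts[v] is the sum over distinct target interests of v's occurrences in index[i]
theorem pvCntOuter (T : List String) (g : String → List String) (c : PySem.Dict String Int)
    (v : String) :
    (T.foldl (fun c i => (g i).foldl (fun c u => c.insert u (c.getD u 0 + 1)) c) c).getD v 0 =
      c.getD v 0 + (T.map (fun i => (((g i).count v : Int)))).sum := by
  induction T generalizing c with
  | nil => simp
  | cons i T ih =>
    simp only [List.foldl_cons, List.map_cons, List.sum_cons]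
    rw [ih, PySem.Dict.getD_foldl_insert_add_one]
    ring

-- counting a key in the first components of a filtered association list with unique keys
theorem pvCountFilter (P : List (String × List (String × List String)))
    (hnd : (P.map Prod.fst).Nodup) (q : (String × List (String × List String)) → Bool)
    (u : String) (p : List (String × List String)) (hmem : (u, p) ∈ P) :
    ((P.filter q).map Prod.fst).count u = if q (u, p) then 1 else 0 := by
  induction P with
  | nil => simp at hmem
  | cons e P ih =>
    have hnd' : e.1 ∉ P.map Prod.fst ∧ (P.map Prod.fst).Nodup := by
      rw [List.map_cons, List.nodup_cons] at hnd; exact hnd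
    rcases List.mem_cons.mp hmem with heq | hmem'
    · subst heq
      have hu : u ∉ (P.filter q).map Prod.fst := by
        intro h
        exact hnd'.1 (by
          rcases List.mem_map.mp h with ⟨e', he', rfl⟩
          exact List.mem_map.mpr ⟨e', List.mem_of_mem_filter he', rfl⟩)
      by_cases hq : q (u, p)
      · simp [hq, List.count_eq_zero.mpr hu]
      · simp [hq, List.count_eq_zero.mpr hu]
    · have hne : u ≠ e.1 := by
        intro h
        exact hnd'.1 (h ▸ List.mem_map.mpr ⟨(u, p), hmem', rfl⟩)
      by_cases hq : q e
      · simp [hq, Ne.symm hne, ih hnd'.2 hmem']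
      · simp [hq, ih hnd'.2 hmem']

-- per-user agreement: B's counts lookup equals A's intersection size
theorem pvCommonEq (profiles : List (String × List (String × List String))) (tgt : String)
    (T : List String) (hnd : (profiles.map Prod.fst).Nodup)
    (u : String) (p : List (String × List String)) (hmem : (u, p) ∈ profiles) (hu : u ≠ tgt) :
    ((PySem.Set.ofList T).foldl
        (fun c i =>
          (((profiles.foldl (fun d e =>
              if e.1 == tgt then d
              else (PySem.Set.ofList (pvInterests e.2)).foldl
                     (fun d i => d.insert i (d.getD i [] ++ [e.1])) d) PySem.Dict.empty).getD i []).foldl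
            (fun c u => c.insert u (c.getD u 0 + 1)) c)) PySem.Dict.empty).getD u 0 =
      PySem.Set.len (PySem.Set.inter (PySem.Set.ofList T) (PySem.Set.ofList (pvInterests p))) := by
  rw [pvCntOuter]
  have hcount : ∀ i : String,
      (((profiles.foldl (fun d e =>
          if e.1 == tgt then d
          else (PySem.Set.ofList (pvInterests e.2)).foldl
                 (fun d i => d.insert i (d.getD i [] ++ [e.1])) d) PySem.Dict.empty).getD i []).count u : Int) =
        if decide (i ∈ pvInterests p) = true then (1 : Int) else 0 := by
    intro i
    rw [pvIdxOuter]
    simp only [PySem.Dict.getD_empty, List.nil_append]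
    rw [pvCountFilter profiles hnd _ u p hmem]
    have : ((u, p).1 != tgt) = true := by simp [hu]
    simp only [this, Bool.true_and]
    by_cases hi : i ∈ pvInterests p <;> simp [hi]
  simp only [hcount]
  rw [PySem.List.sum_map_ite_one_zero (fun x => decide (x ∈ pvInterests p))]
  simp only [PySem.Dict.getD_empty, zero_add]
  unfold PySem.Set.len PySem.Set.inter
  rw [← List.countP_eq_length_filter]
  congr 1
  apply List.countP_congr
  intro x _
  constructor
  · intro h
    exact (PySem.Set.contains_iff _ _).mpr ((PySem.Set.mem_ofList _ _).mpr (of_decide_eq_true h))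
  · intro h
    exact decide_eq_true ((PySem.Set.mem_ofList _ _).mp ((PySem.Set.contains_iff _ _).mp h))

-- ===== VERDICT (by name: the statement is the Claim_ definition above) =====
theorem recommend_by_interests_spec : Claim_equal_recommend_by_interests := by
  intro profiles target_user _hdom hpre
  obtain ⟨_htgt, hnd, _hint⟩ := hpre
  show recommend_by_interests profiles target_user = recommend_by_interests_alt profiles target_user
  unfold recommend_by_interests recommend_by_interests_alt
  dsimp only
  congr 1
  apply PySem.List.foldl_congr_mem
  intro acc e hmem
  by_cases he : e.1 = target_user
  · simp [he]
  · have hbeq : (e.1 == target_user) = false := by simp [he]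
    simp only [hbeq, Bool.false_eq_true, if_false]
    congr 3
    exact (pvCommonEq profiles target_user _ hnd e.1 e.2 (by simpa using hmem) he).symm
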